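-- pv_equiv track=rewrite | github.com/locbp-uzh/biopipelines | HelpScripts/pipe_selection_editor.py | expand_selection
-- ===== SOURCE A (Python) =====
-- from typing import List, Tuple, Set
--
-- def merge_overlapping_ranges(ranges: List[Tuple[int, int]]) -> List[Tuple[int, int]]:
--     """
--     Merge overlapping or adjacent ranges.
--
--     Args:
--         ranges: List of (start, end) tuples
--
--     Returns:
--         Merged list of ranges
--     """
--     if not ranges:
--         return []
--
--     # Sort ranges by start position
--     sorted_ranges = sorted(ranges)
--
--     merged = [sorted_ranges[0]]
--     for current_start, current_end in sorted_ranges[1:]: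
--         last_start, last_end = merged[-1]
--
--         # Check if ranges overlap or are adjacent
--         if current_start <= last_end + 1:
--             # Merge by extending the last range
--             merged[-1] = (last_start, max(last_end, current_end))
--         else:
--             # No overlap, add as new range
--             merged.append((current_start, current_end))
--
--     return merged
--
-- def expand_selection(ranges: List[Tuple[int, int]], expand_by: int,
--                     valid_residues: Set[int]) -> List[Tuple[int, int]]:
--     """
--     Expand selection ranges by adding residues on each side.
--
--     Args:
--         ranges: List of (start, end) tuples
--         expand_by: Number of residues to add on each side
--         valid_residues: Set of valid residue numbers from PDB
--
--     Returns:
--         Expanded and merged ranges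
--     """
--     if expand_by == 0:
--         return ranges
--
--     expanded = []
--     for start, end in ranges:
--         # Attempt to expand
--         new_start = start - expand_by
--         new_end = end + expand_by
--
--         # Find actual valid start (first valid residue >= new_start)
--         actual_start = start
--         for res in sorted(valid_residues):
--             if res >= new_start:
--                 actual_start = res
--                 break
--
--         # Find actual valid end (last valid residue <= new_end)
--         actual_end = end
--         for res in sorted(valid_residues, reverse=True):
--             if res <= new_end:
--                 actual_end = res
--                 break
--
--         expanded.append((actual_start, actual_end))
--
--     # Merge any overlapping ranges created by expansion
--     return merge_overlapping_ranges(expanded)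
-- ===== SOURCE B (Python) =====
-- from typing import List, Tuple, Set
--
-- # B: sort valid_residues ONCE, find each boundary by hand-rolled binary search
-- # (bisect not imported since A imports no stdlib modules), then a single
-- # running-pair merge pass.  A re-sorts the residue set twice per range.
--
-- def _bisect_left(a, x):
--     lo, hi = 0, len(a)
--     while lo < hi:
--         mid = (lo + hi) // 2
--         if a[mid] < x:
--             lo = mid + 1
--         else:
--             hi = mid
--     return lo
--
-- def _bisect_right(a, x):
--     lo, hi = 0, len(a)
--     while lo < hi:
--         mid = (lo + hi) // 2
--         if a[mid] <= x:
--             lo = mid + 1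
--         else:
--             hi = mid
--     return lo
--
-- def expand_selection(ranges: List[Tuple[int, int]], expand_by: int,
--                     valid_residues: Set[int]) -> List[Tuple[int, int]]:
--     if expand_by == 0:
--         return ranges
--     sv = sorted(valid_residues)
--     n = len(sv)
--     expanded = []
--     for start, end in ranges:
--         i = _bisect_left(sv, start - expand_by)
--         lo = sv[i] if i < n else start
--         j = _bisect_right(sv, end + expand_by)
--         hi = sv[j - 1] if j > 0 else end
--         expanded.append((lo, hi))
--     expanded.sort()
--     if not expanded:
--         return []
--     merged = []
--     cs, ce = expanded[0]
--     for s, e in expanded[1:]: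
--         if s <= ce + 1:
--             ce = max(ce, e)
--         else:
--             merged.append((cs, ce))
--             cs, ce = s, e
--     merged.append((cs, ce))
--     return merged
-- ===== Notes on version B (the rewrite author's own statement) =====
-- stated objective: faster
-- what changed: B sorts the residue list once and finds each range's boundaries by binary search (plus a single running-pair merge pass), instead of A's re-sorting the residues twice per range and scanning linearly.
import Mathlib
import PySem

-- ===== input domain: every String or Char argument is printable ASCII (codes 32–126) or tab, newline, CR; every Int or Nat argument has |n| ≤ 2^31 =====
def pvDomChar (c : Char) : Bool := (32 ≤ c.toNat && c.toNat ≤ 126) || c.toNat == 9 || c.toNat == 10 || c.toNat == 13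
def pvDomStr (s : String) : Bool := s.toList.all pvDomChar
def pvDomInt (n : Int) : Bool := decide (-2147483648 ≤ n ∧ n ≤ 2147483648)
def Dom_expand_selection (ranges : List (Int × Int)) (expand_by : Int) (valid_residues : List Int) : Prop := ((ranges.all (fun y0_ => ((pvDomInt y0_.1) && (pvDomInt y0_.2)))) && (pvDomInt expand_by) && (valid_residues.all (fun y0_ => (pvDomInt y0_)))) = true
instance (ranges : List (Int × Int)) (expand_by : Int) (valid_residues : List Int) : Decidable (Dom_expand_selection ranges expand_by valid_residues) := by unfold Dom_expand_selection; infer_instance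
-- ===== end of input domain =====

-- B sorts the residue list once and binary-searches each range's boundaries
-- (single running-pair merge pass) instead of A's per-range re-sorting + linear scans.


-- ===== PORT A =====
-- 'for res in sorted(...): if res >= new_start: actual_start = res; break' with default d
def firstGE : List Int → Int → Int → Int
  | [], _, d => d
  | r :: rs, ns, d => if r ≥ ns then r else firstGE rs ns d

-- 'for res in sorted(..., reverse=True): if res <= new_end: actual_end = res; break'
def firstLE : List Int → Int → Int → Int
  | [], _, d => d
  | r :: rs, ne, d => if r ≤ ne then r else firstLE rs ne d

-- loop body of merge_overlapping_ranges; merged kept in reverse (append/last-update at the head)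
def mergeStep (acc : List (Int × Int)) (c : Int × Int) : List (Int × Int) :=
  match acc with
  | (ls, le) :: t => if c.1 ≤ le + 1 then (ls, max le c.2) :: t else c :: (ls, le) :: t
  | [] => [c]

def merge_overlapping_ranges (ranges : List (Int × Int)) : List (Int × Int) :=
  match PySem.List.sorted2 ranges (fun p => p.1) (fun p => p.2) with
  | [] => []
  | h :: t => (t.foldl mergeStep [h]).reverse

def expand_selection (ranges : List (Int × Int)) (expand_by : Int) (valid_residues : List Int) : List (Int × Int) :=
  if expand_by = 0 then ranges
  else
    let expanded := ranges.map (fun p =>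
      let new_start := p.1 - expand_by
      let new_end := p.2 + expand_by
      let actual_start := firstGE (PySem.List.sorted valid_residues (fun y => y)) new_start p.1
      let actual_end := firstLE (PySem.List.sorted valid_residues (fun y => y) true) new_end p.2
      (actual_start, actual_end))
    merge_overlapping_ranges expanded

-- ===== PORT B =====
-- hand-written _bisect_left from Source B (Source B does not import bisect since A imports no stdlib modules)
def bisectL (a : List Int) (x : Int) (lo hi : Nat) : Nat :=
  if _h : lo < hi then
    let mid := (lo + hi) / 2
    if a.getD mid 0 < x then bisectL a x (mid + 1) hi else bisectL a x lo mid
  else lo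
termination_by hi - lo
decreasing_by all_goals omega

-- hand-written _bisect_right from Source B
def bisectR (a : List Int) (x : Int) (lo hi : Nat) : Nat :=
  if _h : lo < hi then
    let mid := (lo + hi) / 2
    if a.getD mid 0 ≤ x then bisectR a x (mid + 1) hi else bisectR a x lo mid
  else lo
termination_by hi - lo
decreasing_by all_goals omega

-- Source B's merge pass: running pair (cs, ce), flushed when a gap appears
def mergeRuns : Int × Int → List (Int × Int) → List (Int × Int)
  | cur, [] => [cur]
  | cur, q :: rest =>
    if q.1 ≤ cur.2 + 1 then mergeRuns (cur.1, max cur.2 q.2) rest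
    else cur :: mergeRuns (q.1, q.2) rest

def expand_selection_alt (ranges : List (Int × Int)) (expand_by : Int) (valid_residues : List Int) : List (Int × Int) :=
  if expand_by = 0 then ranges
  else
    let sv := PySem.List.sorted valid_residues (fun y => y)
    let n := sv.length
    let expanded := ranges.map (fun p =>
      let i := bisectL sv (p.1 - expand_by) 0 n
      let lo := if i < n then sv.getD i 0 else p.1
      let j := bisectR sv (p.2 + expand_by) 0 n
      let hi := if 0 < j then sv.getD (j - 1) 0 else p.2
      (lo, hi))
    match PySem.List.sorted2 expanded (fun p => p.1) (fun p => p.2) with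
    | [] => []
    | h :: t => mergeRuns h t

-- ===== PRECONDITION & SPEC =====
def Spec_expand_selection (ranges : List (Int × Int)) (expand_by : Int) (valid_residues : List Int) (out : List (Int × Int)) : Prop := out = expand_selection_alt ranges expand_by valid_residues
instance (ranges : List (Int × Int)) (expand_by : Int) (valid_residues : List Int) (out : List (Int × Int)) : Decidable (Spec_expand_selection ranges expand_by valid_residues out) := by unfold Spec_expand_selection; infer_instance

-- ===== CLAIM (what is proved, stated in full; the proofs are below) =====
def Claim_equal_expand_selection : Prop := ∀ (ranges : List (Int × Int)) (expand_by : Int) (valid_residues : List Int), Dom_expand_selection ranges expand_by valid_residues → Spec_expand_selection ranges expand_by valid_residues (expand_selection ranges expand_by valid_residues)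

-- ===== LEMMAS AND PROOFS =====

-- binary-search invariants for the hand-written bisects
lemma bisectL_spec (a : List Int) (hs : a.Pairwise (· ≤ ·)) (x : Int) :
    ∀ (fuel lo hi : Nat), hi - lo ≤ fuel → lo ≤ hi → hi ≤ a.length →
    (∀ j (hj : j < a.length), j < lo → a[j] < x) →
    (∀ j (hj : j < a.length), hi ≤ j → x ≤ a[j]) →
    bisectL a x lo hi ≤ a.length ∧
    (∀ j (hj : j < a.length), j < bisectL a x lo hi → a[j] < x) ∧
    (∀ j (hj : j < a.length), bisectL a x lo hi ≤ j → x ≤ a[j]) := by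
  intro fuel
  induction fuel with
  | zero =>
    intro lo hi hf hlh hlen hlo hhi
    have h0 : ¬ lo < hi := by omega
    rw [bisectL, dif_neg h0]
    refine ⟨by omega, hlo, ?_⟩
    intro j hj hle
    exact hhi j hj (by omega)
  | succ m ih =>
    intro lo hi hf hlh hlen hlo hhi
    by_cases h : lo < hi
    · rw [bisectL, dif_pos h]
      have hmidlt : (lo + hi) / 2 < hi := by omega
      have hmidge : lo ≤ (lo + hi) / 2 := by omega
      have hmlen : (lo + hi) / 2 < a.length := by omega
      have hget : a.getD ((lo + hi) / 2) 0 = a[(lo + hi) / 2] := List.getD_eq_getElem a 0 hmlen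
      have hpw := (List.pairwise_iff_getElem).mp hs
      by_cases hc : a.getD ((lo + hi) / 2) 0 < x
      · rw [if_pos hc]
        refine ih ((lo + hi) / 2 + 1) hi (by omega) (by omega) hlen ?_ hhi
        intro j hj hjlt
        by_cases hjlo : j < lo
        · exact hlo j hj hjlo
        · rcases Nat.lt_succ_iff_lt_or_eq.mp hjlt with hjm | hjm
          · calc a[j] ≤ a[(lo + hi) / 2] := hpw j ((lo + hi) / 2) hj hmlen hjm
              _ < x := by rwa [hget] at hc
          · subst hjm; rwa [hget] at hc
      · rw [if_neg hc]
        refine ih lo ((lo + hi) / 2) (by omega) (by omega) (by omega) hlo ?_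
        intro j hj hjle
        rcases Nat.lt_or_ge ((lo + hi) / 2) j with hjm | hjm
        · calc x ≤ a[(lo + hi) / 2] := by rw [← hget]; omega
            _ ≤ a[j] := hpw ((lo + hi) / 2) j hmlen hj hjm
        · have : j = (lo + hi) / 2 := by omega
          subst this; rw [← hget]; omega
    · rw [bisectL, dif_neg h]
      refine ⟨by omega, hlo, ?_⟩
      intro j hj hle
      exact hhi j hj (by omega)

lemma bisectR_spec (a : List Int) (hs : a.Pairwise (· ≤ ·)) (x : Int) :
    ∀ (fuel lo hi : Nat), hi - lo ≤ fuel → lo ≤ hi → hi ≤ a.length →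
    (∀ j (hj : j < a.length), j < lo → a[j] ≤ x) →
    (∀ j (hj : j < a.length), hi ≤ j → x < a[j]) →
    bisectR a x lo hi ≤ a.length ∧
    (∀ j (hj : j < a.length), j < bisectR a x lo hi → a[j] ≤ x) ∧
    (∀ j (hj : j < a.length), bisectR a x lo hi ≤ j → x < a[j]) := by
  intro fuel
  induction fuel with
  | zero =>
    intro lo hi hf hlh hlen hlo hhi
    have h0 : ¬ lo < hi := by omega
    rw [bisectR, dif_neg h0]
    refine ⟨by omega, hlo, ?_⟩
    intro j hj hle
    exact hhi j hj (by omega)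
  | succ m ih =>
    intro lo hi hf hlh hlen hlo hhi
    by_cases h : lo < hi
    · rw [bisectR, dif_pos h]
      have hmidlt : (lo + hi) / 2 < hi := by omega
      have hmidge : lo ≤ (lo + hi) / 2 := by omega
      have hmlen : (lo + hi) / 2 < a.length := by omega
      have hget : a.getD ((lo + hi) / 2) 0 = a[(lo + hi) / 2] := List.getD_eq_getElem a 0 hmlen
      have hpw := (List.pairwise_iff_getElem).mp hs
      by_cases hc : a.getD ((lo + hi) / 2) 0 ≤ x
      · rw [if_pos hc]
        refine ih ((lo + hi) / 2 + 1) hi (by omega) (by omega) hlen ?_ hhi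
        intro j hj hjlt
        by_cases hjlo : j < lo
        · exact hlo j hj hjlo
        · rcases Nat.lt_succ_iff_lt_or_eq.mp hjlt with hjm | hjm
          · calc a[j] ≤ a[(lo + hi) / 2] := hpw j ((lo + hi) / 2) hj hmlen hjm
              _ ≤ x := by rwa [hget] at hc
          · subst hjm; rwa [hget] at hc
      · rw [if_neg hc]
        refine ih lo ((lo + hi) / 2) (by omega) (by omega) (by omega) hlo ?_
        intro j hj hjle
        rcases Nat.lt_or_ge ((lo + hi) / 2) j with hjm | hjm
        · calc x < a[(lo + hi) / 2] := by rw [← hget]; omega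
            _ ≤ a[j] := hpw ((lo + hi) / 2) j hmlen hj hjm
        · have : j = (lo + hi) / 2 := by omega
          subst this; rw [← hget]; omega
    · rw [bisectR, dif_neg h]
      refine ⟨by omega, hlo, ?_⟩
      intro j hj hle
      exact hhi j hj (by omega)

-- A's left-to-right scan equals "element at index i" for any i with the bisect-left bracketing
lemma firstGE_at (l : List Int) (x d : Int) :
    ∀ (i : Nat), i ≤ l.length →
    (∀ j (hj : j < l.length), j < i → l[j] < x) →
    (∀ j (hj : j < l.length), i ≤ j → x ≤ l[j]) →
    firstGE l x d = if i < l.length then l.getD i 0 else d := by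
  induction l with
  | nil => intro i hle _ _; simp [firstGE]
  | cons a t ih =>
    intro i hle hlt hge
    match i with
    | 0 =>
      have hx : x ≤ a := hge 0 (by simp) (by omega)
      simp [firstGE, hx]
    | i' + 1 =>
      have ha : a < x := hlt 0 (by simp) (by omega)
      have hna : ¬ a ≥ x := by omega
      rw [firstGE, if_neg hna]
      have := ih i' (by simpa using hle)
        (fun j hj hjlt => by
          have := hlt (j + 1) (by simpa using Nat.succ_lt_succ hj) (by omega)
          simpa using this)
        (fun j hj hjge => by
          have := hge (j + 1) (by simpa using Nat.succ_lt_succ hj) (by omega)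
          simpa using this)
      rw [this]
      simp

-- the reverse-sorted list is the reverse of the sorted list (Int, identity key)
lemma sorted_rev_eq_reverse (v : List Int) :
    PySem.List.sorted v (fun y => y) true = (PySem.List.sorted v (fun y => y)).reverse := by
  have h1 : ((PySem.List.sorted v (fun y => y) true).reverse).Perm (PySem.List.sorted v (fun y => y)) := by
    refine List.Perm.trans (List.reverse_perm _) ?_
    exact (PySem.List.sorted_perm v (fun y => y) true).trans (PySem.List.sorted_perm v (fun y => y) false).symm
  have h2 : ((PySem.List.sorted v (fun y => y) true).reverse).Pairwise (· ≤ ·) := by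
    rw [List.pairwise_reverse]
    exact PySem.List.sorted_pairwise_rev v (fun y => y)
  have h3 : (PySem.List.sorted v (fun y => y)).Pairwise (· ≤ ·) :=
    PySem.List.sorted_pairwise v (fun y => y)
  have := PySem.List.eq_of_perm_of_pairwise_le_of_injective (fun y => y)
    (fun _ _ h => h) h1 h2 h3
  rw [← this, List.reverse_reverse]

-- A's scan of a descending list, mirror of firstGE_at
lemma firstLE_at (l : List Int) (x d : Int) :
    ∀ (i : Nat), i ≤ l.length →
    (∀ j (hj : j < l.length), j < i → x < l[j]) →
    (∀ j (hj : j < l.length), i ≤ j → l[j] ≤ x) →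
    firstLE l x d = if i < l.length then l.getD i 0 else d := by
  induction l with
  | nil => intro i hle _ _; simp [firstLE]
  | cons a t ih =>
    intro i hle hlt hge
    match i with
    | 0 =>
      have hx : a ≤ x := hge 0 (by simp) (by omega)
      simp [firstLE, hx]
    | i' + 1 =>
      have ha : x < a := hlt 0 (by simp) (by omega)
      have hna : ¬ a ≤ x := by omega
      rw [firstLE, if_neg hna]
      have := ih i' (by simpa using hle)
        (fun j hj hjlt => by
          have := hlt (j + 1) (by simpa using Nat.succ_lt_succ hj) (by omega)
          simpa using this)
        (fun j hj hjge => by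
          have := hge (j + 1) (by simpa using Nat.succ_lt_succ hj) (by omega)
          simpa using this)
      rw [this]
      simp

-- foldl over mergeStep (reversed accumulator) equals the running-pair pass
lemma foldl_mergeStep (t : List (Int × Int)) :
    ∀ (cur : Int × Int) (acc : List (Int × Int)),
    (t.foldl mergeStep (cur :: acc)).reverse = acc.reverse ++ mergeRuns cur t := by
  induction t with
  | nil => intro cur acc; simp [mergeRuns]
  | cons q rest ih =>
    intro cur acc
    rcases cur with ⟨cs, ce⟩
    by_cases hc : q.1 ≤ ce + 1
    · have : mergeStep ((cs, ce) :: acc) q = (cs, max ce q.2) :: acc := by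
        simp [mergeStep, hc]
      rw [List.foldl_cons, this, ih]
      simp [mergeRuns, hc]
    · have : mergeStep ((cs, ce) :: acc) q = q :: (cs, ce) :: acc := by
        simp [mergeStep, hc]
      rw [List.foldl_cons, this, ih ⟨q.1, q.2⟩ ((cs, ce) :: acc)]
      simp [mergeRuns, hc]

-- bridging A's scans to B's bisect expressions
lemma start_eq (v : List Int) (x d : Int) :
    firstGE (PySem.List.sorted v (fun y => y)) x d =
      (if bisectL (PySem.List.sorted v (fun y => y)) x 0 (PySem.List.sorted v (fun y => y)).length <
          (PySem.List.sorted v (fun y => y)).length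
       then (PySem.List.sorted v (fun y => y)).getD
              (bisectL (PySem.List.sorted v (fun y => y)) x 0 (PySem.List.sorted v (fun y => y)).length) 0
       else d) := by
  have hs : (PySem.List.sorted v (fun y => y)).Pairwise (· ≤ ·) :=
    PySem.List.sorted_pairwise v (fun y => y)
  obtain ⟨h1, h2, h3⟩ := bisectL_spec (PySem.List.sorted v (fun y => y)) hs x
    (PySem.List.sorted v (fun y => y)).length 0 (PySem.List.sorted v (fun y => y)).length
    (by omega) (by omega) (le_refl _) (by omega) (by omega)
  exact firstGE_at _ x d _ h1 h2 h3

lemma end_eq (v : List Int) (x d : Int) :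
    firstLE (PySem.List.sorted v (fun y => y) true) x d =
      (if 0 < bisectR (PySem.List.sorted v (fun y => y)) x 0 (PySem.List.sorted v (fun y => y)).length
       then (PySem.List.sorted v (fun y => y)).getD
              (bisectR (PySem.List.sorted v (fun y => y)) x 0 (PySem.List.sorted v (fun y => y)).length - 1) 0
       else d) := by
  have hs : (PySem.List.sorted v (fun y => y)).Pairwise (· ≤ ·) :=
    PySem.List.sorted_pairwise v (fun y => y)
  obtain ⟨h1, h2, h3⟩ := bisectR_spec (PySem.List.sorted v (fun y => y)) hs x
    (PySem.List.sorted v (fun y => y)).length 0 (PySem.List.sorted v (fun y => y)).length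
    (by omega) (by omega) (le_refl _) (by omega) (by omega)
  rw [sorted_rev_eq_reverse]
  set sv := PySem.List.sorted v (fun y => y) with hsv
  set n := sv.length with hn
  set j := bisectR sv x 0 n with hj
  have hrev := firstLE_at sv.reverse x d (n - j)
    (by simp [hn])
    (fun k hk hklt => by
      have hk' : k < n := by simpa [hn] using hk
      rw [List.getElem_reverse]
      exact h3 (sv.length - 1 - k) (by omega) (by omega))
    (fun k hk hkge => by
      have hk' : k < n := by simpa [hn] using hk
      rw [List.getElem_reverse]
      exact h2 (sv.length - 1 - k) (by omega) (by omega))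
  rw [hrev]
  by_cases hjp : 0 < j
  · have hnj : n - j < sv.reverse.length := by simp [hn]; omega
    have hj1 : j - 1 < n := by omega
    rw [if_pos (by simpa [hn] using hnj), if_pos hjp]
    rw [List.getD_eq_getElem _ 0 hnj, List.getD_eq_getElem _ 0 (by simpa [hn] using hj1)]
    rw [List.getElem_reverse]
    have hidx : sv.length - 1 - (n - j) = j - 1 := by omega
    simp [hidx]
  · have hj0 : j = 0 := by omega
    rw [if_neg (by simp [hj0, hn]), if_neg hjp]

-- the two merge formulations agree
lemma merge_eq (E : List (Int × Int)) :
    merge_overlapping_ranges E =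
      (match PySem.List.sorted2 E (fun p => p.1) (fun p => p.2) with
       | [] => []
       | h :: t => mergeRuns h t) := by
  unfold merge_overlapping_ranges
  cases h : PySem.List.sorted2 E (fun p => p.1) (fun p => p.2) with
  | nil => rfl
  | cons hd t => simpa using foldl_mergeStep t hd []

-- ===== VERDICT (by name: the statement is the Claim_ definition above) =====
theorem expand_selection_spec : Claim_equal_expand_selection := by
  intro ranges eb v _
  unfold Spec_expand_selection
  by_cases heb : eb = 0
  · simp [expand_selection, expand_selection_alt, heb]
  · simp only [expand_selection, expand_selection_alt, if_neg heb]
    have hmap : ranges.map (fun p =>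
        (firstGE (PySem.List.sorted v (fun y => y)) (p.1 - eb) p.1,
         firstLE (PySem.List.sorted v (fun y => y) true) (p.2 + eb) p.2))
      = ranges.map (fun p =>
        (if bisectL (PySem.List.sorted v (fun y => y)) (p.1 - eb) 0 (PySem.List.sorted v (fun y => y)).length <
            (PySem.List.sorted v (fun y => y)).length
         then (PySem.List.sorted v (fun y => y)).getD
                (bisectL (PySem.List.sorted v (fun y => y)) (p.1 - eb) 0 (PySem.List.sorted v (fun y => y)).length) 0
         else p.1,
         if 0 < bisectR (PySem.List.sorted v (fun y => y)) (p.2 + eb) 0 (PySem.List.sorted v (fun y => y)).length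
         then (PySem.List.sorted v (fun y => y)).getD
                (bisectR (PySem.List.sorted v (fun y => y)) (p.2 + eb) 0 (PySem.List.sorted v (fun y => y)).length - 1) 0
         else p.2)) := by
      apply List.map_congr_left
      intro p _
      rw [start_eq, end_eq]
    rw [merge_eq, hmap]
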